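-- pv_equiv track=rewrite | github.com/collinsakenga/codewars_solutions | 5 kyu/5 kyu_Simple Fun  # 358 Vertical Histogram Of Letters.py | vertical_histogram_of
-- ===== SOURCE A (Python) =====
-- from collections import Counter
--
-- def vertical_histogram_of(s):
--     dict = Counter(i for i in s if i.isupper())
--     if not dict:
--         return ""
--     length = dict.most_common()[0][1]
--     temp = {k: v for k, v in sorted(dict.items(), key=lambda x: x[0])}
--     res = [[" "]*(len(temp)) for i in range(length+1)]
--     for i, (k, v) in enumerate(temp.items()):
--         res[-1][i] = k
--         for j in range(len(res)-1-v, len(res)-1):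
--             res[j][i] = "*"
--     return "\n".join(" ".join(i).rstrip() for i in res)
-- ===== SOURCE B (Python) =====
-- def vertical_histogram_of(s):
--     counts = {}
--     for c in s:
--         if c.isupper():
--             counts[c] = counts.get(c, 0) + 1
--     if not counts:
--         return ""
--     height = max(counts.values())
--     letters = sorted(counts)
--     rows = [' '.join('*' if counts[c] >= level else ' ' for c in letters).rstrip()
--             for level in range(height, 0, -1)]
--     rows.append(' '.join(letters))
--     return '\n'.join(rows)
-- ===== Notes on version B (the rewrite author's own statement) =====
-- stated objective: simpler
-- what changed: A allocates a (height+1) x n character grid and mutates it column by column (stars and label written by index into nested lists) before joining; B never builds a grid: it counts uppercase letters with a plain dict, then generates each output row directly by comparing every letter's count against the current level, top level down, and appends the label row.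
import Mathlib
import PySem

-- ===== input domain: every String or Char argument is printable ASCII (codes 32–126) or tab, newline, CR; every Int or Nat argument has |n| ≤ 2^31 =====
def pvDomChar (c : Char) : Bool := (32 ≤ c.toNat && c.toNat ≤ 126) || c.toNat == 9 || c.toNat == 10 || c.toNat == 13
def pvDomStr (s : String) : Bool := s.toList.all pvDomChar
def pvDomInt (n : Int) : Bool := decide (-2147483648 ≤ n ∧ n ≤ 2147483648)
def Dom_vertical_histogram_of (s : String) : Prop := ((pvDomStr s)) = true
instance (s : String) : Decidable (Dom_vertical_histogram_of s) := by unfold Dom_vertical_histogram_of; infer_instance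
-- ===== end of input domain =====

-- B builds the histogram row by row from the counts instead of mutating a 2D character grid; objective: simpler.

-- ===== PORT A =====
def vhA_step (res : List (List Char)) (ikv : Int × (Char × Int)) : List (List Char) :=
  match ikv with
  | (i, (k, v)) =>
    let res1 := res.modify (res.length - 1) (fun row => row.set i.toNat k)
    (PySem.List.pyRange ((res1.length : Int) - 1 - v) ((res1.length : Int) - 1) 1).foldl
      (fun r j => r.modify j.toNat (fun row => row.set i.toNat '*')) res1

def vertical_histogram_of (s : String) : String :=
  let d := PySem.Dict.counter (s.toList.filter (fun c => PySem.Chars.isupper c))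
  if d.items.isEmpty then ""
  else
    let length : Int := (((PySem.List.sorted d.items (fun p => p.2) true).head?).getD ('A', 0)).2
    let temp := PySem.Dict.ofList (PySem.List.sorted d.items (fun p => p.1) false)
    let res0 := (PySem.List.pyRange 0 (length + 1) 1).map (fun _ => List.replicate temp.items.length ' ')
    let res := (PySem.List.enumerate temp.items).foldl vhA_step res0
    String.ofList (PySem.Chars.join ['\n'] (res.map (fun row => PySem.Chars.rstrip (PySem.Chars.join [' '] (row.map (fun c => [c]))))))

-- ===== PORT B =====
def vertical_histogram_of_alt (s : String) : String :=
  let counts := s.toList.foldl (fun d c => if PySem.Chars.isupper c then d.insert c (d.getD c 0 + 1) else d) PySem.Dict.empty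
  if counts.items.isEmpty then ""
  else
    let height : Int := (PySem.List.max? counts.values (fun x => x)).getD 0
    let letters := PySem.List.sorted counts.keys (fun x => x) false
    let rows := (PySem.List.pyRange height 0 (-1)).map (fun level =>
      PySem.Chars.rstrip (PySem.Chars.join [' '] (letters.map (fun c => if level ≤ counts.getD c 0 then ['*'] else [' ']))))
    String.ofList (PySem.Chars.join ['\n'] (rows ++ [PySem.Chars.join [' '] (letters.map (fun c => [c]))]))


-- ===== PRECONDITION & SPEC =====
def Spec_vertical_histogram_of (s : String) (out : String) : Prop := out = vertical_histogram_of_alt s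
instance (s : String) (out : String) : Decidable (Spec_vertical_histogram_of s out) := by unfold Spec_vertical_histogram_of; infer_instance

-- ===== CLAIM (what is proved, stated in full; the proofs are below) =====
def Claim_equal_vertical_histogram_of : Prop := ∀ (s : String), Dom_vertical_histogram_of s → Spec_vertical_histogram_of s (vertical_histogram_of s)

-- ===== LEMMAS AND PROOFS =====

def vhCell (j R : Nat) (p : Char × Int) : Char :=
  if j = R - 1 then p.1 else if ((R : Int) - 1 - p.2 ≤ (j : Int) ∧ (j : Int) < (R : Int) - 1) then '*' else ' '

def vhRowStep (j R : Nat) (row : List Char) (ikv : Int × (Char × Int)) : List Char :=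
  if j = R - 1 then row.set ikv.1.toNat ikv.2.1
  else if ((R : Int) - 1 - ikv.2.2 ≤ (j : Int) ∧ (j : Int) < (R : Int) - 1) then row.set ikv.1.toNat '*'
  else row

theorem vhFoldModifyLen {α : Type} (f : α → α) :
    ∀ (l : List Int) (r : List α), (l.foldl (fun r t => r.modify t.toNat f) r).length = r.length := by
  intro l
  induction l with
  | nil => intro r; rfl
  | cons t l ih => intro r; simp [List.foldl_cons, ih, List.length_modify]

theorem vhStepLen (res : List (List Char)) (x : Int × (Char × Int)) :
    (vhA_step res x).length = res.length := by
  obtain ⟨i, k, v⟩ := x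
  simp [vhA_step, vhFoldModifyLen, List.length_modify]

theorem vhFoldModifyRange {α : Type} (f : α → α) :
    ∀ (n : Nat) (a b : Int), (b - a).toNat = n → 0 ≤ a → ∀ (r : List α) (j : Nat),
      ((PySem.List.pyRange a b 1).foldl (fun r t => r.modify t.toNat f) r)[j]? =
        if a ≤ (j : Int) ∧ (j : Int) < b then (r[j]?).map f else r[j]? := by
  intro n
  induction n with
  | zero =>
    intro a b hn ha r j
    rw [PySem.List.pyRange_one_eq_nil (by omega)]
    have : ¬ (a ≤ (j : Int) ∧ (j : Int) < b) := by omega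
    simp [this]
  | succ n ih =>
    intro a b hn ha r j
    rw [PySem.List.pyRange_one_cons (by omega), List.foldl_cons,
      ih (a+1) b (by omega) (by omega), List.getElem?_modify]
    by_cases h1 : (j : Int) = a
    · have ht : a.toNat = j := by omega
      have h2 : ¬ (a + 1 ≤ (j : Int) ∧ (j : Int) < b) := by omega
      have h3 : a ≤ (j : Int) ∧ (j : Int) < b := by omega
      simp only [if_neg h2, if_pos h3, ht]
      cases r[j]? <;> simp
    · have ht : ¬ (a.toNat = j) := by omega
      simp only [ht, Option.map_eq_map]
      by_cases h2 : a + 1 ≤ (j : Int) ∧ (j : Int) < b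
      · have h3 : a ≤ (j : Int) ∧ (j : Int) < b := by omega
        simp only [if_pos h2, if_pos h3]
        cases r[j]? <;> simp
      · have h3 : ¬ (a ≤ (j : Int) ∧ (j : Int) < b) := by omega
        simp only [if_neg h2, if_neg h3]
        cases r[j]? <;> simp

theorem vhFoldModifyRange' {α : Type} (f : α → α) (a b : Int) (ha : 0 ≤ a) (r : List α) (j : Nat) :
    ((PySem.List.pyRange a b 1).foldl (fun r t => r.modify t.toNat f) r)[j]? =
      if a ≤ (j : Int) ∧ (j : Int) < b then (r[j]?).map f else r[j]? :=
  vhFoldModifyRange f (b - a).toNat a b rfl ha r j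

theorem vhStepGet (res : List (List Char)) (i : Int) (k : Char) (v : Int)
    (hv : v ≤ (res.length : Int) - 1) (j : Nat) :
    (vhA_step res (i, (k, v)))[j]? = (res[j]?).map (fun row => vhRowStep j res.length row (i, (k, v))) := by
  show ((PySem.List.pyRange _ _ 1).foldl _ _)[j]? = _
  rw [List.length_modify]
  rw [vhFoldModifyRange' (α := List Char) (fun row => row.set i.toNat '*') ((res.length : Int) - 1 - v) ((res.length : Int) - 1) (by omega)]
  rw [List.getElem?_modify]
  by_cases hR : res.length = 0
  · have : res = [] := List.length_eq_zero_iff.mp hR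
    subst this; simp
  · by_cases hj : j = res.length - 1
    · have hji : (j : Int) = (res.length : Int) - 1 := by omega
      have hc : ¬ ((res.length : Int) - 1 - v ≤ (j : Int) ∧ (j : Int) < (res.length : Int) - 1) := by omega
      have hn : res.length - 1 = j := hj.symm
      simp only [if_neg hc, if_pos hn, vhRowStep, if_pos hj]
      cases res[j]? <;> simp
    · have hn : ¬ (res.length - 1 = j) := fun h => hj h.symm
      simp only [if_neg hn, vhRowStep, if_neg hj]
      by_cases hc : ((res.length : Int) - 1 - v ≤ (j : Int) ∧ (j : Int) < (res.length : Int) - 1)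
      · simp only [if_pos hc]
        cases res[j]? <;> simp
      · simp only [if_neg hc]
        cases res[j]? <;> simp

theorem vhGridGet (ps : List (Char × Int)) :
    ∀ (i0 : Int) (res : List (List Char)),
      (∀ p ∈ ps, p.2 ≤ (res.length : Int) - 1) → ∀ (j : Nat),
      ((PySem.List.enumerate ps i0).foldl vhA_step res)[j]? =
        (res[j]?).map (fun row => (PySem.List.enumerate ps i0).foldl (vhRowStep j res.length) row) := by
  induction ps with
  | nil =>
    intro i0 res _ j
    simp [PySem.List.enumerate]
  | cons p ps ih =>
    intro i0 res hv j
    obtain ⟨k, v⟩ := p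
    rw [PySem.List.enumerate_cons, List.foldl_cons]
    have hlen : (vhA_step res (i0, (k, v))).length = res.length := vhStepLen res _
    rw [ih (i0 + 1) (vhA_step res (i0, (k, v)))
      (by rw [hlen]; intro q hq; exact hv q (List.mem_cons_of_mem _ hq)) j]
    rw [hlen, vhStepGet res i0 k v (hv (k, v) (List.mem_cons_self)) j]
    simp only [List.foldl_cons]
    cases res[j]? <;> simp

theorem vhRowFold (j R : Nat) :
    ∀ (ps : List (Char × Int)) (i0 : Nat) (pre : List Char), pre.length = i0 →
      (PySem.List.enumerate ps (i0 : Int)).foldl (vhRowStep j R) (pre ++ List.replicate ps.length ' ') =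
        pre ++ ps.map (vhCell j R) := by
  intro ps
  induction ps with
  | nil => intro i0 pre h; simp [PySem.List.enumerate]
  | cons p ps ih =>
    intro i0 pre h
    rw [PySem.List.enumerate_cons, List.foldl_cons]
    have hstep : vhRowStep j R (pre ++ List.replicate (p :: ps).length ' ') ((i0 : Int), p) =
        (pre ++ [vhCell j R p]) ++ List.replicate ps.length ' ' := by
      unfold vhRowStep vhCell
      have hset : ∀ (c : Char), (pre ++ List.replicate (p :: ps).length ' ').set ((i0 : Int)).toNat c =
          (pre ++ [c]) ++ List.replicate ps.length ' ' := by
        intro c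
        rw [Int.toNat_natCast, List.set_append, if_neg (by omega)]
        simp [h, List.replicate_succ]
      split
      · exact hset _
      · split
        · exact hset _
        · simp [List.replicate_succ, List.append_assoc]
    rw [hstep]
    have : ((i0 : Int) + 1) = ((i0 + 1 : Nat) : Int) := by push_cast; ring
    rw [this, ih (i0 + 1) (pre ++ [vhCell j R p]) (by simp [h])]
    simp

theorem vhJoinLast (ks : List Char) (hne : ks ≠ []) :
    ∃ t c, PySem.Chars.join [' '] (ks.map (fun c => [c])) = t ++ [c] ∧ c ∈ ks := by
  induction ks with
  | nil => exact absurd rfl hne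
  | cons a ks ih =>
    cases ks with
    | nil => exact ⟨[], a, by simp [PySem.Chars.join_singleton], by simp⟩
    | cons b ks =>
      obtain ⟨t, c, hj, hc⟩ := ih (by simp)
      refine ⟨a :: ' ' :: t, c, ?_, by simp [hc]⟩
      simp only [List.map_cons] at hj ⊢
      rw [PySem.Chars.join_cons_cons, hj]
      simp

theorem vhRstripJoin (ks : List Char) (h : ∀ k ∈ ks, PySem.Chars.isspace k = false) :
    PySem.Chars.rstrip (PySem.Chars.join [' '] (ks.map (fun c => [c]))) =
      PySem.Chars.join [' '] (ks.map (fun c => [c])) := by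
  cases ks with
  | nil => rfl
  | cons a ks =>
    obtain ⟨t, c, hj, hc⟩ := vhJoinLast (a :: ks) (by simp)
    rw [hj]
    simp [PySem.Chars.rstrip, h c hc]

theorem vhIsupperNotSpace (c : Char) (h : PySem.Chars.isupper c = true) :
    PySem.Chars.isspace c = false := by
  simp only [PySem.Chars.isupper, Bool.and_eq_true, decide_eq_true_eq, Char.le_def] at h
  have h65 : 65 ≤ c.toNat ∧ c.toNat ≤ 90 := by
    obtain ⟨h1, h2⟩ := h
    constructor
    · exact h1
    · exact h2
  simp only [PySem.Chars.isspace]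
  simp only [Bool.or_eq_false_iff, Bool.and_eq_false_iff, decide_eq_false_iff_not]
  omega

theorem vhFoldFilter {α β : Type} (p : α → Bool) (f : β → α → β) :
    ∀ (xs : List α) (init : β),
      xs.foldl (fun b a => if p a then f b a else b) init = (xs.filter p).foldl f init := by
  intro xs
  induction xs with
  | nil => intro init; rfl
  | cons x xs ih =>
    intro init
    by_cases h : p x = true
    · simp [h, ih]
    · simp at h
      simp [h, ih]

theorem vh_main (s : String) : vertical_histogram_of s = vertical_histogram_of_alt s := by
  unfold vertical_histogram_of vertical_histogram_of_alt
  rw [vhFoldFilter (β := PySem.Dict Char Int) (fun c => PySem.Chars.isupper c)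
      (fun d c => d.insert c (d.getD c 0 + 1)) s.toList PySem.Dict.empty,
    PySem.Dict.foldl_insert_getD_add_one_eq_counter]
  set L := s.toList.filter (fun c => PySem.Chars.isupper c) with hLdef
  by_cases hemp : (PySem.Dict.counter L).items = []
  · simp [hemp]
  · have hbe : (PySem.Dict.counter L).items.isEmpty = false := by
      simp [hemp]
    simp only [hbe, Bool.false_eq_true, if_false]
    have hLup : ∀ c ∈ L, PySem.Chars.isupper c = true := by
      intro c hc; exact (List.mem_filter.mp hc).2
    set ks := PySem.List.sorted (PySem.Set.ofList L) (fun x => x) false with hksdef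
    have hperm : ks.Perm (PySem.Set.ofList L) := PySem.List.sorted_perm _ _ _
    have hnodp : ks.Nodup := (hperm.nodup_iff).mpr (PySem.Set.nodup_ofList L)
    have hkmem : ∀ k ∈ ks, k ∈ L := by
      intro k hk
      exact (PySem.Set.mem_ofList _ _).mp (hperm.mem_iff.mp hk)
    have hitems : (PySem.Dict.counter L).items
        = (PySem.Set.ofList L).map (fun k => (k, (List.count k L : Int))) :=
      PySem.Dict.items_counter L
    -- the sorted items list
    have hps : PySem.List.sorted ((PySem.Dict.counter L).items) (fun p => p.1) false
        = ks.map (fun k => (k, (List.count k L : Int))) := by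
      apply PySem.List.sorted_eq_of_perm_of_pairwise_lt
      · rw [hitems]; exact hperm.map _
      · exact List.pairwise_map.mpr (PySem.List.sorted_ofList_pairwise_lt L)
    set ps := ks.map (fun k => (k, (List.count k L : Int))) with hpsdef
    -- temp's items are just the sorted pairs
    have htemp : (PySem.Dict.ofList ps).items = ps := by
      show (List.foldl (fun acc p => acc.insert p.1 p.2) PySem.Dict.empty ps).items = ps
      rw [PySem.Dict.items_foldl_insert_fresh ps Prod.fst Prod.snd PySem.Dict.empty
        (fun a _ => PySem.Dict.contains_empty _) (by rw [hpsdef, List.map_map]; simpa [Function.comp_def] using hnodp)]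
      have h0 : (PySem.Dict.empty : PySem.Dict Char Int).items = [] := rfl
      simp [h0]
    -- the height
    have hsne : PySem.List.sorted ((PySem.Dict.counter L).items) (fun p => p.2) true ≠ [] := by
      rw [Ne, PySem.List.sorted_eq_nil_iff]; exact hemp
    obtain ⟨m, t, hmt⟩ := List.exists_cons_of_ne_nil hsne
    have hmmem : m ∈ (PySem.Dict.counter L).items :=
      (PySem.List.sorted_perm _ _ _).mem_iff.mp (hmt ▸ List.mem_cons_self)
    have hmax : ∀ y ∈ (PySem.Dict.counter L).items, y.2 ≤ m.2 :=
      PySem.List.key_head_sorted_rev_ge _ _ hmt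
    have hval : (PySem.Dict.counter L).values = ((PySem.Dict.counter L).items).map (fun p => p.2) := rfl
    obtain ⟨M, hM⟩ : ∃ M, PySem.List.max? ((PySem.Dict.counter L).values) (fun x => x) = some M := by
      cases h : PySem.List.max? ((PySem.Dict.counter L).values) (fun x => x) with
      | none =>
        exfalso
        rw [PySem.List.max?_eq_none_iff] at h
        rw [hval, List.map_eq_nil_iff] at h
        exact hemp h
      | some M => exact ⟨M, rfl⟩
    have hMmem : M ∈ (PySem.Dict.counter L).values := PySem.List.max?_mem hM
    have hMmax : ∀ y ∈ (PySem.Dict.counter L).values, y ≤ M := PySem.List.max?_isMax hM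
    have hHM : m.2 = M := by
      apply le_antisymm
      · exact hMmax m.2 (by rw [hval]; exact List.mem_map_of_mem hmmem)
      · rw [hval] at hMmem
        obtain ⟨y, hy, hyM⟩ := List.mem_map.mp hMmem
        exact hyM ▸ hmax y hy
    set H := m.2 with hHdef
    have hH1 : 1 ≤ H := by
      rw [hitems] at hmmem
      obtain ⟨k, hk, hkm⟩ := List.mem_map.mp hmmem
      have : k ∈ L := (PySem.Set.mem_ofList _ _).mp hk
      have : 1 ≤ List.count k L := List.count_pos_iff.mpr this
      rw [hHdef, ← hkm]
      simpa using this
    have hcntle : ∀ k ∈ ks, (List.count k L : Int) ≤ H := by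
      intro k hk
      have hkS : k ∈ PySem.Set.ofList L := hperm.mem_iff.mp hk
      have : (k, (List.count k L : Int)) ∈ (PySem.Dict.counter L).items := by
        rw [hitems]; exact List.mem_map_of_mem hkS
      exact hmax _ this
    -- rewrite the head-of-sorted and max? expressions
    rw [hmt, hM, hps, htemp]
    simp only [List.head?_cons, Option.getD_some]
    rw [← hHdef, ← hHM]
    rw [PySem.Dict.keys_counter, ← hksdef]
    simp only [PySem.Dict.getD_counter]
    have hHt : (H.toNat : Int) = H := Int.toNat_of_nonneg (by omega)
    have hmapconst : (PySem.List.pyRange 0 (H+1) 1).map (fun _ => List.replicate ps.length ' ')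
        = List.replicate (H.toNat + 1) (List.replicate ps.length ' ') := by
      rw [List.map_const', PySem.List.length_pyRange_one]
      congr 1
      omega
    have hvbound : ∀ p ∈ ps, p.2 ≤ ((List.replicate (H.toNat + 1) (List.replicate ps.length ' ')).length : Int) - 1 := by
      intro p hp
      rw [List.length_replicate]
      rw [hpsdef] at hp
      obtain ⟨k, hk, rfl⟩ := List.mem_map.mp hp
      have := hcntle k hk
      push_cast
      omega
    have hgrid : (PySem.List.enumerate ps 0).foldl vhA_step (List.replicate (H.toNat + 1) (List.replicate ps.length ' '))
        = (List.range (H.toNat + 1)).map (fun j => ps.map (vhCell j (H.toNat + 1))) := by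
      apply List.ext_getElem?
      intro j
      rw [vhGridGet ps 0 _ hvbound j, List.length_replicate, List.getElem?_replicate]
      by_cases hj : j < H.toNat + 1
      · rw [if_pos hj]
        have hrow := vhRowFold j (H.toNat + 1) ps 0 [] rfl
        rw [List.nil_append] at hrow
        have hcast : ((0:Nat) : Int) = 0 := rfl
        rw [hcast] at hrow
        simp [hj, hrow]
      · rw [if_neg hj]
        have hle : H.toNat + 1 ≤ j := by omega
        simp [List.getElem?_eq_none, hle]
    rw [hmapconst, hgrid, List.map_map]
    rw [PySem.List.pyRange_neg_one]
    have hsub0 : (H - 0).toNat = H.toNat := by omega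
    rw [hsub0, List.map_map]
    rw [List.range_succ, List.map_append]
    congr 1
    congr 1
    congr 1
    · -- the star rows
      apply List.map_congr_left
      intro j hjmem
      have hj := List.mem_range.mp hjmem
      simp only [Function.comp]
      have hinner : (ps.map (vhCell j (H.toNat+1))).map (fun c => [c])
          = ks.map (fun c => if H - (j:Int) ≤ (List.count c L : Int) then ['*'] else [' ']) := by
        rw [hpsdef, List.map_map, List.map_map]
        apply List.map_congr_left
        intro k hk
        simp only [Function.comp]
        unfold vhCell
        have hne : j ≠ (H.toNat + 1) - 1 := by omega
        rw [if_neg hne]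
        have hcond : (((H.toNat+1 : Nat):Int) - 1 - (List.count k L : Int) ≤ (j:Int)
            ∧ (j:Int) < ((H.toNat+1 : Nat):Int) - 1) ↔ (H - (j:Int) ≤ (List.count k L : Int)) := by
          push_cast
          omega
        by_cases hc : H - (j:Int) ≤ (List.count k L : Int)
        · rw [if_pos (hcond.mpr hc), if_pos hc]
        · rw [if_neg (fun h => hc (hcond.mp h)), if_neg hc]
      rw [hinner]
    · -- the label row
      have hcells : ps.map (vhCell H.toNat (H.toNat+1)) = ks := by
        rw [hpsdef, List.map_map]
        have hpt : ∀ k ∈ ks, (vhCell H.toNat (H.toNat+1) ∘ fun k => (k, (List.count k L : Int))) k = id k := by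
          intro k hk
          simp only [Function.comp, id]
          unfold vhCell
          rw [if_pos (by omega)]
        rw [List.map_congr_left hpt, List.map_id]
      simp only [List.map_cons, List.map_nil, Function.comp]
      rw [hcells, vhRstripJoin ks (fun k hk => vhIsupperNotSpace k (hLup k (hkmem k hk)))]

-- ===== VERDICT (by name: the statement is the Claim_ definition above) =====
theorem vertical_histogram_of_spec : Claim_equal_vertical_histogram_of := by
  intro s _
  show vertical_histogram_of s = vertical_histogram_of_alt s
  exact vh_main s
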